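-- pv_equiv track=rewrite | github.com/yeongminChae/Python-Practice | 40~60/50.py | func
-- ===== SOURCE A (Python) =====
-- def func(a):
--     height = 10
--     for i in range(1, len(a)):
--         if a[i] == a[i - 1]:
--             height += 5
--         else:
--             height += 10
--     return height
-- ===== SOURCE B (Python) =====
-- def func(a):
--     n = len(a)
--     if n == 0:
--         return 10
--     runs = 0
--     i = 0
--     while i < n:
--         runs += 1
--         j = i
--         while j < n and a[j] == a[i]:
--             j += 1
--         i = j
--     return 5 * (n - 1) + 5 * (runs - 1) + 10
-- ===== Notes on version B (the rewrite author's own statement) =====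
-- stated objective: alternative
-- what changed: Instead of scoring each adjacent pair with a branch in one accumulation loop, B counts the maximal runs of equal elements with a two-pointer scan that skips over each run, then returns the closed formula 5*(n-1) + 5*(runs-1) + 10.
import Mathlib
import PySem

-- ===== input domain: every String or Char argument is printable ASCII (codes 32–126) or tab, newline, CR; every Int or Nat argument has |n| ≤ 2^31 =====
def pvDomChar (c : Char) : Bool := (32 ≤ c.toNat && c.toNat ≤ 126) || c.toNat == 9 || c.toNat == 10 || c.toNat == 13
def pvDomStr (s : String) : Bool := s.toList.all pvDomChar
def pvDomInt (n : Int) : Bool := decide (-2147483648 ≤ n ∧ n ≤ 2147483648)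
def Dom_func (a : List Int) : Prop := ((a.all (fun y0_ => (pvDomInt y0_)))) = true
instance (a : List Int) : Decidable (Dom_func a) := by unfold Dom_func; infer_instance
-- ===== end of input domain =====

-- B replaces A's per-pair branch accumulation with a two-pointer scan that skips
-- over each maximal run of equal elements and a closed formula (objective: alternative).

-- ===== PORT A =====
-- height = 10; for i in range(1, len(a)): height += 5 if a[i] == a[i-1] else 10
def func (a : List Int) : Int :=
  (PySem.List.pyRange 1 (a.length : Int) 1).foldl
    (fun height i =>
      if PySem.List.pyGetD a i 0 = PySem.List.pyGetD a (i - 1) 0 then height + 5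
      else height + 10)
    10

-- ===== PORT B =====
-- inner while loop: 'j = i; while j < n and a[j] == a[i]: j += 1' (v = a[i])
def pvInner (a : List Int) (v : Int) (j : Nat) : Nat :=
  if h : j < a.length then
    if a[j]'h = v then pvInner a v (j + 1) else j
  else j
termination_by a.length - j
decreasing_by omega

-- termination facts for the outer loop (cited by pvOuter's decreasing_by)
theorem pvInner_ge (a : List Int) (v : Int) (j : Nat) : j ≤ pvInner a v j := by
  fun_induction pvInner a v j <;> omega

theorem pvInner_gt (a : List Int) (v : Int) (j : Nat) (h : j < a.length)
    (hv : a[j]'h = v) : j < pvInner a v j := by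
  rw [pvInner]
  simp only [h, hv, dite_true, if_true]
  have := pvInner_ge a v (j + 1)
  omega

theorem pvInner_le_of_le (a : List Int) (v : Int) (j : Nat) :
    j ≤ a.length → pvInner a v j ≤ a.length := by
  fun_induction pvInner a v j with
  | case1 j h _ ih => intro _; exact ih (by omega)
  | case2 j h _ => intro hj; exact hj
  | case3 j h => intro hj; exact hj

-- outer while loop: 'while i < n: runs += 1; (inner scan); i = j'
def pvOuter (a : List Int) (i runs : Nat) : Nat :=
  if h : i < a.length then pvOuter a (pvInner a (a[i]'h) i) (runs + 1) else runs
termination_by a.length - i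
decreasing_by
  have h2 := pvInner_gt a (a[i]'h) i h rfl
  have h3 := pvInner_le_of_le a (a[i]'h) i (Nat.le_of_lt h)
  omega

-- n = len(a); if n == 0: return 10; runs = (two-pointer run count);
-- return 5*(n-1) + 5*(runs-1) + 10
def func_alt (a : List Int) : Int :=
  if a.length = 0 then 10
  else
    let runs := pvOuter a 0 0
    5 * ((a.length : Int) - 1) + 5 * ((runs : Int) - 1) + 10

-- ===== PRECONDITION & SPEC =====
def Spec_func (a : List Int) (out : Int) : Prop := out = func_alt a
instance (a : List Int) (out : Int) : Decidable (Spec_func a out) := by unfold Spec_func; infer_instance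

-- ===== CLAIM (what is proved, stated in full; the proofs are below) =====
def Claim_equal_func : Prop := ∀ (a : List Int), Dom_func a → Spec_func a (func a)

-- ===== LEMMAS AND PROOFS =====

-- A's loop body adds 5 or 10 each step: fold = init + sum of the increments.
theorem pv_foldl_add_ite {α : Type} (c : α → Prop) [DecidablePred c]
    (l : List α) (init : Int) :
    l.foldl (fun h i => if c i then h + 5 else h + 10) init
      = init + (l.map (fun i => if c i then (5 : Int) else 10)).sum := by
  induction l generalizing init with
  | nil => simp
  | cons x t ih =>
      simp only [List.foldl_cons, List.map_cons, List.sum_cons, ih]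
      split_ifs <;> ring

-- sum of the per-pair increments = 10*length − 5*(number of equal pairs)
theorem pv_sum_pairs (l : List (Int × Int)) :
    (l.map (fun p => if p.1 = p.2 then (5 : Int) else 10)).sum
      = 10 * (l.length : Int) - 5 * (l.countP (fun p => p.1 == p.2) : Nat) := by
  induction l with
  | nil => simp
  | cons p t ih =>
      simp only [List.map_cons, List.sum_cons, List.countP_cons, List.length_cons, ih]
      by_cases h : p.1 = p.2
      · simp [h]; ring
      · have hb : (p.1 == p.2) = false := by simpa using h
        simp [h, hb]; ring

-- the list of A's comparisons over range(1, n) is the list of adjacent pairs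
theorem pv_map_range_eq_zip (a : List Int) :
    (PySem.List.pyRange 1 (a.length : Int) 1).map
        (fun i => if PySem.List.pyGetD a i 0 = PySem.List.pyGetD a (i - 1) 0 then (5 : Int) else 10)
      = (a.zip (a.drop 1)).map (fun p => if p.1 = p.2 then (5 : Int) else 10) := by
  rw [PySem.List.pyRange_one, List.map_map]
  apply List.ext_getElem
  · simp [List.length_zip]
  · intro k h1 h2
    have hlen : ((a.length : Int) - 1).toNat = a.length - 1 := by omega
    have hk : k < a.length - 1 := by simpa [hlen] using h1
    have hk1 : k + 1 < a.length := by omega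
    have hk0 : k < a.length := by omega
    simp only [List.getElem_map, List.getElem_range, List.getElem_zip, Function.comp_apply]
    have e1 : PySem.List.pyGetD a (1 + (k : Int)) 0 = a[k + 1] := by
      have : (1 + (k : Int)) = ((k + 1 : Nat) : Int) := by push_cast; ring
      rw [this, PySem.List.pyGetD_natCast]
      simp [hk1]
    have e2 : PySem.List.pyGetD a (1 + (k : Int) - 1) 0 = a[k] := by
      have : (1 + (k : Int) - 1) = ((k : Nat) : Int) := by ring
      rw [this, PySem.List.pyGetD_natCast]
      simp [hk0]
    rw [e1, e2]
    have hkd : k < (a.drop 1).length := by simp; omega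
    have e3 : (a.drop 1)[k] = a[k + 1] := by
      rw [List.getElem_drop]
      congr 1
      omega
    rw [e3]
    rcases eq_or_ne a[k] a[k + 1] with h | h
    · simp [h]
    · simp [h, h.symm]

-- number of unequal adjacent pairs in the suffix starting at index k (proof-side)
def pvE (a : List Int) (k : Nat) : Nat :=
  ((a.drop k).zip (a.drop (k + 1))).countP (fun p => p.1 != p.2)

theorem pvE_nil (a : List Int) (k : Nat) (h : a.length ≤ k + 1) : pvE a k = 0 := by
  unfold pvE
  have : a.drop (k + 1) = [] := List.drop_eq_nil_of_le h
  simp [this]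

theorem pvE_step (a : List Int) (k : Nat) (hk1 : k + 1 < a.length) :
    pvE a k = (if a[k]'(by omega) = a[k + 1]'hk1 then 0 else 1) + pvE a (k + 1) := by
  unfold pvE
  rw [List.drop_eq_getElem_cons (by omega : k < a.length),
      List.drop_eq_getElem_cons hk1]
  rw [List.zip_cons_cons, List.countP_cons]
  rw [← List.drop_eq_getElem_cons hk1]
  rcases eq_or_ne (a[k]'(by omega : k < a.length)) (a[k + 1]'hk1) with h | h
  · simp [h]
  · simp [h]
    omega

-- every element scanned over by the inner loop equals v
theorem pvInner_eq (a : List Int) (v : Int) (j : Nat) :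
    ∀ k (hk : k < a.length), j ≤ k → k < pvInner a v j → a[k]'hk = v := by
  fun_induction pvInner a v j with
  | case1 j h hv ih =>
      intro k hk hjk hlt
      rcases Nat.eq_or_lt_of_le hjk with rfl | hgt
      · exact hv
      · exact ih k hk hgt hlt
  | case2 j h _hv =>
      intro k hk hjk hlt
      omega
  | case3 j h =>
      intro k hk hjk hlt
      omega

-- the element where the inner loop stops (if in range) differs from v
theorem pvInner_ne (a : List Int) (v : Int) (j : Nat)
    (h : pvInner a v j < a.length) : a[pvInner a v j]'h ≠ v := by
  fun_induction pvInner a v j with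
  | case1 j hj _hv ih => exact ih h
  | case2 j hj hv => simpa using hv
  | case3 j hj => omega

-- inside the run starting at i, the unequal-pair count from k is determined by
-- what lies beyond the run
theorem pvE_run (a : List Int) (v : Int) (i : Nat) (hi : i < a.length)
    (hv : a[i]'hi = v) :
    ∀ d k, pvInner a v i - k ≤ d → i ≤ k → k < pvInner a v i →
      pvE a k = if pvInner a v i < a.length then 1 + pvE a (pvInner a v i) else 0 := by
  set j := pvInner a v i with hj
  have hjlen : j ≤ a.length := pvInner_le_of_le a v i (Nat.le_of_lt hi)
  intro d
  induction d with
  | zero => intro k hd _ hk; omega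
  | succ d ih =>
      intro k hd hik hkj
      have hklen : k < a.length := by omega
      have hak : a[k]'hklen = v := pvInner_eq a v i k hklen hik hkj
      by_cases hkj1 : k + 1 = j
      · by_cases hjl : j < a.length
        · rw [if_pos hjl]
          have hk1 : k + 1 < a.length := by omega
          rw [pvE_step a k hk1]
          have hne : a[k]'hklen ≠ a[k + 1]'hk1 := by
            have := pvInner_ne a v i hjl
            intro hcontra
            apply this
            rw [← hj] at *
            have : a[j]'hjl = a[k + 1]'hk1 := by
              congr 1
              omega
            rw [this, ← hcontra, hak]
          rw [if_neg hne, hkj1]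
        · rw [if_neg hjl]
          exact pvE_nil a k (by omega)
      · have hk1j : k + 1 < j := by omega
        have hk1len : k + 1 < a.length := by omega
        rw [pvE_step a k hk1len]
        have hak1 : a[k + 1]'hk1len = v := pvInner_eq a v i (k + 1) hk1len (by omega) hk1j
        have heq : a[k]'hklen = a[k + 1]'hk1len := by rw [hak, hak1]
        rw [if_pos heq]
        simpa using ih (k + 1) (by omega) (by omega) hk1j

-- the outer loop counts 1 + (number of unequal adjacent pairs from i)
theorem pvOuter_eq (a : List Int) :
    ∀ d i r, a.length - i ≤ d → i < a.length →
      pvOuter a i r = r + 1 + pvE a i := by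
  intro d
  induction d with
  | zero => intro i r hd hi; omega
  | succ d ih =>
      intro i r hd hi
      rw [pvOuter]
      simp only [hi, dite_true]
      set j := pvInner a (a[i]'hi) i with hj
      have hij : i < j := pvInner_gt a (a[i]'hi) i hi rfl
      have hjlen : j ≤ a.length := pvInner_le_of_le a (a[i]'hi) i (Nat.le_of_lt hi)
      have hrun := pvE_run a (a[i]'hi) i hi rfl (j - i) i (by omega) (le_refl i) hij
      rw [← hj] at hrun
      by_cases hjl : j < a.length
      · rw [ih j (r + 1) (by omega) hjl]
        rw [if_pos hjl] at hrun
        omega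
      · rw [pvOuter]
        simp only [hjl, dite_false]
        rw [if_neg hjl] at hrun
        omega

theorem pv_main (a : List Int) : func a = func_alt a := by
  unfold func func_alt
  rw [pv_foldl_add_ite, pv_map_range_eq_zip, pv_sum_pairs]
  by_cases hnil : a.length = 0
  · have : a = [] := List.eq_nil_of_length_eq_zero hnil
    subst this
    simp
  · rw [if_neg hnil]
    have hn : 1 ≤ a.length := by omega
    rw [pvOuter_eq a a.length 0 0 (by omega) (by omega)]
    have hE0 : pvE a 0 = (a.zip (a.drop 1)).countP (fun p => p.1 != p.2) := by
      unfold pvE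
      simp
    have hcompl : (a.zip (a.drop 1)).length
        = (a.zip (a.drop 1)).countP (fun p => p.1 == p.2)
          + (a.zip (a.drop 1)).countP (fun p => p.1 != p.2) := by
      have := List.length_eq_countP_add_countP (p := fun p : Int × Int => p.1 == p.2)
        (l := a.zip (a.drop 1))
      simpa [bne] using this
    have hL : (a.zip (a.drop 1)).length = a.length - 1 := by
      simp [List.length_zip]
    rw [hE0]
    set Eq := (a.zip (a.drop 1)).countP (fun p => p.1 == p.2) with hEq
    set Ne := (a.zip (a.drop 1)).countP (fun p => p.1 != p.2) with hNe
    rw [hL] at hcompl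
    have hcast : ((a.length - 1 : Nat) : Int) = (a.length : Int) - 1 := by omega
    rw [hL, hcast]
    push_cast
    omega

-- ===== VERDICT (by name: the statement is the Claim_ definition above) =====
theorem func_spec : Claim_equal_func := by
  intro a _
  unfold Spec_func
  exact pv_main a
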